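-- pv_equiv track=rewrite | github.com/sertdfyguhi/ide-for-my-esolangs | run.py | pltsrun
-- ===== SOURCE A (Python) =====
-- def pltsrun(text):
--     stack = []
--     toprint = ''
--     e = False
--     a = False
--     for idx, letter in enumerate(text):
--         if not a:
--             if letter == '?':
--                 a = True
--                 stack.append(text[idx + 1])
--             elif letter == '%':
--                 a = True
--                 stack.insert(0, text[idx + 1])
--             elif letter == '&':
--                 toprint += stack[-1] + '\n'
--             elif letter == '$':
--                 toprint += stack[0] + '\n'
--             elif letter == '#':
--                 toprint += ''.join(stack) + '\n'
--             elif letter == '@':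
--                 toprint += ''.join(stack)[::-1] + '\n'
--             elif letter == '<':
--                 del stack[0]
--             elif letter == '>':
--                 del stack[-1]
--             else:
--                 return f"At {idx + 1}, '{text[idx]}': Error."
--                 e = True
--                 break
--         else:
--             a = False
--     if not e:
--         s = toprint.rsplit('\n', 1)
--         return ''.join(s)
-- ===== SOURCE B (Python) =====
-- def pltsrun(text):
--     # pass 1: parse the program into a token list (fail at the first bad character)
--     tokens = []
--     i = 0
--     n = len(text)
--     while i < n:
--         c = text[i]
--         if c == '?' or c == '%':
--             tokens.append((c, text[i + 1]))
--             i += 2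
--         elif c in '&$#@<>':
--             tokens.append((c, None))
--             i += 1
--         else:
--             return f"At {i + 1}, '{c}': Error."
--     # pass 2: run the token list, collecting the output lines
--     stack = []
--     lines = []
--     for c, arg in tokens:
--         if c == '?':
--             stack.append(arg)
--         elif c == '%':
--             stack.insert(0, arg)
--         elif c == '&':
--             lines.append(stack[-1])
--         elif c == '$':
--             lines.append(stack[0])
--         elif c == '#':
--             lines.append(''.join(stack))
--         elif c == '@':
--             lines.append(''.join(stack)[::-1])
--         elif c == '<':
--             del stack[0]
--         else:
--             del stack[-1]
--     return '\n'.join(lines)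
-- ===== Notes on version B (the rewrite author's own statement) =====
-- stated objective: alternative
-- what changed: Splits A's single interleaved loop with a boolean skip-flag into two staged passes: a parser that turns the text into a token list (returning the error string at the first bad character) and a separate evaluator over the token list that collects output lines, joined once with newline separators instead of A's append-newline-then-rsplit repair.
import Mathlib
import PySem

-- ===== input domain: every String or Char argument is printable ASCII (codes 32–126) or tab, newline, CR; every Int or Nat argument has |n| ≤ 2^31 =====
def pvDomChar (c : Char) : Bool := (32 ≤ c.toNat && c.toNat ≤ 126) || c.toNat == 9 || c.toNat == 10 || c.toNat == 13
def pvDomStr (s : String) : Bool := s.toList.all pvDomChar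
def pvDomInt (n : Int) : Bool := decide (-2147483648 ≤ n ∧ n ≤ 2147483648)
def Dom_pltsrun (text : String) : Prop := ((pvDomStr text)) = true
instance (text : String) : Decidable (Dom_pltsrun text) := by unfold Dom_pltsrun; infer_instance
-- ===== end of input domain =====

-- B replaces A's single interleaved skip-flag loop by two staged passes — parse the text
-- into a token list, then evaluate the tokens collecting output lines joined once with '\n';
-- objective: alternative decomposition (same cost).

-- ===== PORT A =====

-- f"At {idx + 1}, '{text[idx]}': Error."  (letter = text[idx])
def pltsErrA (idx : Nat) (c : Char) : List Char :=
  "At ".toList ++ PySem.Int.toChars ((idx : Int) + 1) ++ ", '".toList ++ [c] ++ "': Error.".toList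

-- hand port of ''.join(toprint.rsplit('\n', 1)): remove the LAST '\n' (if any) from tp
def pltsRsplitJoin (tp : List Char) : List Char :=
  match (tp.reverse).dropWhile (· ≠ '\n') with
  | [] => tp
  | _ :: post => post.reverse ++ ((tp.reverse).takeWhile (· ≠ '\n')).reverse

-- the 'for idx, letter in enumerate(text)' loop with the skip flag a; early return on error.
-- rem = cs.drop idx; stack peeks use pyGetD (default ' ' is never observed inside Pre_).
def pltsLoopA (cs : List Char) : List Char → Nat → List Char → List Char → Bool → String
  | [], _, _, tp, _ => String.ofList (pltsRsplitJoin tp)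
  | _ :: rest, idx, stack, tp, true => pltsLoopA cs rest (idx + 1) stack tp false
  | c :: rest, idx, stack, tp, false =>
    if c = '?' then
      pltsLoopA cs rest (idx + 1) (stack ++ [PySem.List.pyGetD cs ((idx : Int) + 1) ' ']) tp true
    else if c = '%' then
      pltsLoopA cs rest (idx + 1) (PySem.List.pyGetD cs ((idx : Int) + 1) ' ' :: stack) tp true
    else if c = '&' then
      pltsLoopA cs rest (idx + 1) stack (tp ++ [PySem.List.pyGetD stack (-1) ' ', '\n']) false
    else if c = '$' then
      pltsLoopA cs rest (idx + 1) stack (tp ++ [PySem.List.pyGetD stack 0 ' ', '\n']) false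
    else if c = '#' then
      pltsLoopA cs rest (idx + 1) stack (tp ++ stack ++ ['\n']) false
    else if c = '@' then
      pltsLoopA cs rest (idx + 1) stack (tp ++ stack.reverse ++ ['\n']) false
    else if c = '<' then
      pltsLoopA cs rest (idx + 1) (stack.tail) tp false
    else if c = '>' then
      pltsLoopA cs rest (idx + 1) (stack.dropLast) tp false
    else
      String.ofList (pltsErrA idx c)

def pltsrun (text : String) : String :=
  pltsLoopA text.toList text.toList 0 [] [] false

-- ===== PORT B =====

-- f"At {i + 1}, '{c}': Error."
def pltsErrB (i : Nat) (c : Char) : List Char :=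
  "At ".toList ++ PySem.Int.toChars ((i : Int) + 1) ++ ", '".toList ++ [c] ++ "': Error.".toList

-- pass 1: the while loop building the token list; operand read uses pyGetD
-- (default ' ' never observed inside Pre_, where the operand exists).
def pltsParseB (cs : List Char) (i : Nat) : Except (List Char) (List (Char × Option Char)) :=
  if h : i < cs.length then
    let c := cs[i]
    if c = '?' ∨ c = '%' then
      match pltsParseB cs (i + 2) with
      | .error e => .error e
      | .ok ts => .ok ((c, some (PySem.List.pyGetD cs ((i : Int) + 1) ' ')) :: ts)
    else if c = '&' ∨ c = '$' ∨ c = '#' ∨ c = '@' ∨ c = '<' ∨ c = '>' then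
      match pltsParseB cs (i + 1) with
      | .error e => .error e
      | .ok ts => .ok ((c, none) :: ts)
    else .error (pltsErrB i c)
  else .ok []
termination_by cs.length - i

-- pass 2: the for loop over tokens, accumulating the output lines
def pltsEvalB : List (Char × Option Char) → List Char → List (List Char) → List (List Char)
  | [], _, lines => lines
  | (c, arg) :: rest, stack, lines =>
    if c = '?' then pltsEvalB rest (stack ++ [arg.getD ' ']) lines
    else if c = '%' then pltsEvalB rest (arg.getD ' ' :: stack) lines
    else if c = '&' then pltsEvalB rest stack (lines ++ [[PySem.List.pyGetD stack (-1) ' ']])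
    else if c = '$' then pltsEvalB rest stack (lines ++ [[PySem.List.pyGetD stack 0 ' ']])
    else if c = '#' then pltsEvalB rest stack (lines ++ [stack])
    else if c = '@' then pltsEvalB rest stack (lines ++ [stack.reverse])
    else if c = '<' then pltsEvalB rest stack.tail lines
    else pltsEvalB rest stack.dropLast lines

def pltsrun_alt (text : String) : String :=
  match pltsParseB text.toList 0 with
  | .error e => String.ofList e
  | .ok toks => String.ofList (List.intercalate ['\n'] (pltsEvalB toks [] []))

-- ===== PRECONDITION & SPEC =====

-- closed-form well-formedness of the program text (n = stack depth): every ?/% has an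
-- operand character after it and every &/$/</> acts on a nonempty stack; anything after the
-- first non-command character is irrelevant (A returns the error string there).
-- Pre_ excludes exactly the inputs where Python A raises IndexError.
def pltsChk : List Char → Nat → Bool → Bool
  | [], _, skip => !skip
  | _ :: rest, n, true => pltsChk rest n false
  | c :: rest, n, false =>
    if c = '?' ∨ c = '%' then pltsChk rest (n + 1) true
    else if c = '&' ∨ c = '$' then decide (n ≠ 0) && pltsChk rest n false
    else if c = '#' ∨ c = '@' then pltsChk rest n false
    else if c = '<' ∨ c = '>' then decide (n ≠ 0) && pltsChk rest (n - 1) false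
    else true

def Pre_pltsrun (text : String) : Prop := pltsChk text.toList 0 false = true
instance (text : String) : Decidable (Pre_pltsrun text) := by unfold Pre_pltsrun; infer_instance

def pvWitness_pltsrun : String := "?a%b#&$<>@x"

def Spec_pltsrun (text : String) (out : String) : Prop := out = pltsrun_alt text
instance (text : String) (out : String) : Decidable (Spec_pltsrun text out) := by unfold Spec_pltsrun; infer_instance

-- ===== CLAIM (what is proved, stated in full; the proofs are below) =====
def Claim_equal_pltsrun : Prop := ∀ (text : String), Dom_pltsrun text → Pre_pltsrun text → Spec_pltsrun text (pltsrun text)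

-- ===== LEMMAS AND PROOFS =====

-- A's toprint as a function of the emitted lines: each line followed by '\n'
def pltsNLcat (ls : List (List Char)) : List Char := (ls.map (· ++ ['\n'])).flatten

lemma pltsRsplit_last (tp : List Char) (h : tp.getLast? = some '\n') :
    pltsRsplitJoin tp = tp.dropLast := by
  have hr : tp.reverse.head? = some '\n' := by
    rw [List.head?_reverse]; exact h
  obtain ⟨t, ht⟩ : ∃ t, tp.reverse = '\n' :: t := by
    cases hrev : tp.reverse with
    | nil => rw [hrev] at hr; simp at hr
    | cons a t => rw [hrev] at hr; simp at hr; exact ⟨t, by rw [hr]⟩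
  have htp : tp = t.reverse ++ ['\n'] := by
    have := congrArg List.reverse ht
    simpa using this
  rw [pltsRsplitJoin, ht]
  simp [List.dropWhile, List.takeWhile, htp]

lemma pltsNLcat_ne (ls : List (List Char)) (h : ls ≠ []) :
    pltsNLcat ls = List.intercalate ['\n'] ls ++ ['\n'] := by
  induction ls with
  | nil => exact absurd rfl h
  | cons l rest ih =>
    cases rest with
    | nil => simp [pltsNLcat, List.intercalate]
    | cons m rs =>
      have := ih (by simp)
      simp only [pltsNLcat, List.map_cons, List.flatten_cons] at this ⊢
      rw [this]
      simp [List.intercalate]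

lemma pltsRsplit_nlcat (ls : List (List Char)) :
    pltsRsplitJoin (pltsNLcat ls) = List.intercalate ['\n'] ls := by
  cases hls : ls with
  | nil => simp [pltsNLcat, pltsRsplitJoin, List.intercalate]
  | cons l rest =>
    have hne : ls ≠ [] := by rw [hls]; simp
    rw [← hls, pltsNLcat_ne ls hne]
    rw [pltsRsplit_last _ (by simp)]
    simp

-- accumulator lemma for pass 2
lemma pltsEvalB_acc (toks : List (Char × Option Char)) :
    ∀ stack lines, pltsEvalB toks stack lines = lines ++ pltsEvalB toks stack [] := by
  induction toks with
  | nil => intro stack lines; simp [pltsEvalB]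
  | cons t rest ih =>
    intro stack lines
    obtain ⟨c, arg⟩ := t
    simp only [pltsEvalB]
    split_ifs <;>
      first
        | exact ih _ _
        | (rw [ih _ (lines ++ _)]; conv_rhs => rw [ih]
           simp)

-- the interleaved A loop equals parse-then-eval
lemma loopAB (cs : List Char) :
    ∀ fuel idx stack lines, cs.length - idx ≤ fuel →
    pltsLoopA cs (cs.drop idx) idx stack (pltsNLcat lines) false =
      (match pltsParseB cs idx with
       | .error e => String.ofList e
       | .ok toks =>
           String.ofList (List.intercalate ['\n'] (lines ++ pltsEvalB toks stack []))) := by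
  intro fuel
  induction fuel with
  | zero =>
    intro idx stack lines hf
    have hlen : cs.length ≤ idx := by omega
    rw [List.drop_eq_nil_of_le hlen, pltsLoopA, pltsParseB]
    simp only [dif_neg (by omega : ¬ idx < cs.length)]
    rw [pltsRsplit_nlcat]
    simp [pltsEvalB]
  | succ m ih =>
    intro idx stack lines hf
    by_cases hlt : idx < cs.length
    · rw [List.drop_eq_getElem_cons hlt, pltsLoopA, pltsParseB]
      simp only [dif_pos hlt]
      by_cases h1 : cs[idx] = '?'
      · simp only [if_pos h1, if_pos (Or.inl h1)]
        by_cases h2 : idx + 1 < cs.length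
        · rw [List.drop_eq_getElem_cons h2, pltsLoopA]
          rw [ih (idx + 2) _ lines (by omega)]
          cases hp : pltsParseB cs (idx + 2) with
          | error e => simp
          | ok ts => simp [pltsEvalB, h1]
        · rw [List.drop_eq_nil_of_le (by omega), pltsLoopA]
          have hp : pltsParseB cs (idx + 2) = .ok [] := by
            rw [pltsParseB]; simp only [dif_neg (by omega : ¬ idx + 2 < cs.length)]
          rw [hp, pltsRsplit_nlcat]
          simp [pltsEvalB, h1]
      · simp only [if_neg h1]
        by_cases h2 : cs[idx] = '%'
        · simp only [if_pos h2, if_pos (Or.inr h2)]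
          by_cases h3 : idx + 1 < cs.length
          · rw [List.drop_eq_getElem_cons h3, pltsLoopA]
            rw [ih (idx + 2) _ lines (by omega)]
            cases hp : pltsParseB cs (idx + 2) with
            | error e => simp
            | ok ts => simp [pltsEvalB, h2]
          · rw [List.drop_eq_nil_of_le (by omega), pltsLoopA]
            have hp : pltsParseB cs (idx + 2) = .ok [] := by
              rw [pltsParseB]; simp only [dif_neg (by omega : ¬ idx + 2 < cs.length)]
            rw [hp, pltsRsplit_nlcat]
            simp [pltsEvalB, h2]
        · simp only [if_neg h2]
          have hq : ¬ (cs[idx] = '?' ∨ cs[idx] = '%') := by tauto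
          simp only [if_neg hq]
          by_cases h3 : cs[idx] = '&'
          · simp only [if_pos h3, if_pos (Or.inl h3)]
            have he : pltsNLcat lines ++ [PySem.List.pyGetD stack (-1) ' ', '\n'] =
                pltsNLcat (lines ++ [[PySem.List.pyGetD stack (-1) ' ']]) := by
              simp [pltsNLcat]
            rw [he, ih (idx + 1) _ _ (by omega)]
            cases hp : pltsParseB cs (idx + 1) with
            | error e => simp
            | ok ts =>
              have ha := pltsEvalB_acc ts stack [[PySem.List.pyGetD stack (-1) ' ']]
              simp [pltsEvalB, ha, h3]
          · simp only [if_neg h3]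
            by_cases h4 : cs[idx] = '$'
            · simp only [if_pos h4, if_pos (Or.inr (Or.inl h4))]
              have he : pltsNLcat lines ++ [PySem.List.pyGetD stack 0 ' ', '\n'] =
                  pltsNLcat (lines ++ [[PySem.List.pyGetD stack 0 ' ']]) := by
                simp [pltsNLcat]
              rw [he, ih (idx + 1) _ _ (by omega)]
              cases hp : pltsParseB cs (idx + 1) with
              | error e => simp
              | ok ts =>
                have ha := pltsEvalB_acc ts stack [[PySem.List.pyGetD stack 0 ' ']]
                simp [pltsEvalB, ha, h4]
            · simp only [if_neg h4]
              by_cases h5 : cs[idx] = '#'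
              · simp only [if_pos h5, if_pos (Or.inr (Or.inr (Or.inl h5)))]
                have he : pltsNLcat lines ++ stack ++ ['\n'] =
                    pltsNLcat (lines ++ [stack]) := by simp [pltsNLcat]
                rw [he, ih (idx + 1) _ _ (by omega)]
                cases hp : pltsParseB cs (idx + 1) with
                | error e => simp
                | ok ts =>
                  have ha := pltsEvalB_acc ts stack [stack]
                  simp [pltsEvalB, ha, h5]
              · simp only [if_neg h5]
                by_cases h6 : cs[idx] = '@'
                · simp only [if_pos h6, if_pos (Or.inr (Or.inr (Or.inr (Or.inl h6))))]
                  have he : pltsNLcat lines ++ stack.reverse ++ ['\n'] =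
                      pltsNLcat (lines ++ [stack.reverse]) := by simp [pltsNLcat]
                  rw [he, ih (idx + 1) _ _ (by omega)]
                  cases hp : pltsParseB cs (idx + 1) with
                  | error e => simp
                  | ok ts =>
                    have ha := pltsEvalB_acc ts stack [stack.reverse]
                    simp [pltsEvalB, ha, h6]
                · simp only [if_neg h6]
                  by_cases h7 : cs[idx] = '<'
                  · simp only [if_pos h7,
                      if_pos (Or.inr (Or.inr (Or.inr (Or.inr (Or.inl h7)))))]
                    rw [ih (idx + 1) _ lines (by omega)]
                    cases hp : pltsParseB cs (idx + 1) with
                    | error e => simp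
                    | ok ts => simp [pltsEvalB, h7]
                  · simp only [if_neg h7]
                    by_cases h8 : cs[idx] = '>'
                    · simp only [if_pos h8,
                        if_pos (Or.inr (Or.inr (Or.inr (Or.inr (Or.inr h8)))))]
                      rw [ih (idx + 1) _ lines (by omega)]
                      cases hp : pltsParseB cs (idx + 1) with
                      | error e => simp
                      | ok ts => simp [pltsEvalB, h8]
                    · have hr : ¬ (cs[idx] = '&' ∨ cs[idx] = '$' ∨ cs[idx] = '#' ∨
                          cs[idx] = '@' ∨ cs[idx] = '<' ∨ cs[idx] = '>') := by tauto
                      simp only [if_neg h8, if_neg hr]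
                      simp [pltsErrA, pltsErrB]
    · rw [List.drop_eq_nil_of_le (by omega), pltsLoopA, pltsParseB]
      simp only [dif_neg hlt]
      rw [pltsRsplit_nlcat]
      simp [pltsEvalB]

-- ===== VERDICT (by name: the statement is the Claim_ definition above) =====
theorem pltsrun_spec : Claim_equal_pltsrun := by
  intro text _ _
  unfold Spec_pltsrun pltsrun pltsrun_alt
  have h := loopAB text.toList text.toList.length 0 [] [] (by omega)
  simp only [List.drop_zero] at h
  rw [show pltsNLcat [] = [] from rfl] at h
  rw [h]
  cases pltsParseB text.toList 0 with
  | error e => rfl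
  | ok toks => simp
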